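-- pv_equiv track=rewrite | github.com/henningbruhn/mobp | vrp_aufgabe/evrp.py | tour_vector_to_list
-- ===== SOURCE A (Python) =====
-- def tour_vector_to_list(tour_vector):
--     vehicle_tour=[]
--     tour=[vehicle_tour]
--     for stop in tour_vector:
--         if stop<0:
--             vehicle_tour=[]
--             tour.append(vehicle_tour)
--         else:
--             vehicle_tour.append(stop)
--     return tour
-- ===== SOURCE B (Python) =====
-- def tour_vector_to_list(tour_vector):
--     boundaries = [-1] + [i for i, s in enumerate(tour_vector) if s < 0] + [len(tour_vector)]
--     return [tour_vector[a + 1:b] for a, b in zip(boundaries, boundaries[1:])]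
-- ===== Notes on version B (the rewrite author's own statement) =====
-- stated objective: idiomatic
-- what changed: B locates the negative-marker positions once and builds each vehicle tour as a slice between consecutive boundaries, instead of A's single pass that mutates a current-tour accumulator.
import Mathlib
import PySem

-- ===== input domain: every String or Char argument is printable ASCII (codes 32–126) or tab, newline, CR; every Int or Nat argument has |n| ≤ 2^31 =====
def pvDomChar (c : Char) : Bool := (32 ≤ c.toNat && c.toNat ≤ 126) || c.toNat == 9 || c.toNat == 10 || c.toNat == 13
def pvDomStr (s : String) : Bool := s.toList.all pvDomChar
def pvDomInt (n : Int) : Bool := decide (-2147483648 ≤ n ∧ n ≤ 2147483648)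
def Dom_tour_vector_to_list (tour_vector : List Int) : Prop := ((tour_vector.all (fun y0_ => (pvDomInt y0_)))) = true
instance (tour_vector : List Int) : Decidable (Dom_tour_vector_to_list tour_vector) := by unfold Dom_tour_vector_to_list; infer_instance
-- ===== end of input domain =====

-- B replaces A's mutating single pass (current-tour accumulator) by locating the negative-marker
-- positions once and slicing the vector between consecutive boundaries (idiomatic; no speed claim).


-- ===== PORT A =====
-- A keeps a pair (finished tours, current vehicle tour); 'tour.append' / 'vehicle_tour.append'
-- become list appends on that state, and the final 'tour' is finished ++ [current].
def tour_vector_to_list (tour_vector : List Int) : List (List Int) :=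
  let s := tour_vector.foldl
    (fun (acc : List (List Int) × List Int) stop =>
      if stop < 0 then (acc.1 ++ [acc.2], ([] : List Int)) else (acc.1, acc.2 ++ [stop]))
    (([] : List (List Int)), ([] : List Int))
  s.1 ++ [s.2]

-- ===== PORT B =====
def tour_vector_to_list_alt (tour_vector : List Int) : List (List Int) :=
  let boundaries : List Int :=
    [-1] ++ (PySem.List.enumerate tour_vector).filterMap
              (fun p => if p.2 < 0 then some p.1 else none)
        ++ [(tour_vector.length : Int)]
  (boundaries.zip boundaries.tail).map
    (fun p => PySem.List.slice tour_vector (some (p.1 + 1)) (some p.2))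

-- ===== PRECONDITION & SPEC =====
def Spec_tour_vector_to_list (tour_vector : List Int) (out : List (List Int)) : Prop := out = tour_vector_to_list_alt tour_vector
instance (tour_vector : List Int) (out : List (List Int)) : Decidable (Spec_tour_vector_to_list tour_vector out) := by unfold Spec_tour_vector_to_list; infer_instance

-- ===== CLAIM (what is proved, stated in full; the proofs are below) =====
def Claim_equal_tour_vector_to_list : Prop := ∀ (tour_vector : List Int), Dom_tour_vector_to_list tour_vector → Spec_tour_vector_to_list tour_vector (tour_vector_to_list tour_vector)

-- ===== LEMMAS AND PROOFS =====

/-- Reference splitter both ports are reduced to. -/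
def pvSplit : List Int → List (List Int)
  | [] => [[]]
  | x :: r => if x < 0 then [] :: pvSplit r else (pvSplit r).modifyHead (fun s => x :: s)

theorem pvSplit_ne_nil (xs : List Int) : pvSplit xs ≠ [] := by
  cases xs with
  | nil => simp [pvSplit]
  | cons x r =>
    simp only [pvSplit]
    split_ifs
    · simp
    · cases h : pvSplit r with
      | nil => exact absurd h (pvSplit_ne_nil r)
      | cons a t => simp

/-- A-side invariant: the fold with state (finished, current). -/
theorem pvFoldA (xs : List Int) : ∀ (fin : List (List Int)) (cur : List Int),
    (let s := xs.foldl
        (fun (acc : List (List Int) × List Int) stop =>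
          if stop < 0 then (acc.1 ++ [acc.2], ([] : List Int)) else (acc.1, acc.2 ++ [stop]))
        (fin, cur)
     s.1 ++ [s.2]) = fin ++ (pvSplit xs).modifyHead (fun s => cur ++ s) := by
  induction xs with
  | nil => intro fin cur; simp [pvSplit]
  | cons x r ih =>
    intro fin cur
    by_cases hx : x < 0
    · simp only [List.foldl_cons, if_pos hx, pvSplit, ih]
      cases h : pvSplit r with
      | nil => exact absurd h (pvSplit_ne_nil r)
      | cons a t => simp
    · simp only [List.foldl_cons, if_neg hx, pvSplit, ih]
      cases h : pvSplit r with
      | nil => exact absurd h (pvSplit_ne_nil r)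
      | cons a t => simp

theorem portA_eq_pvSplit (xs : List Int) : tour_vector_to_list xs = pvSplit xs := by
  have h := pvFoldA xs [] []
  cases hs : pvSplit xs with
  | nil => exact absurd hs (pvSplit_ne_nil xs)
  | cons a t =>
    rw [hs] at h
    simpa [tour_vector_to_list, hs] using h

/-- Consecutive-pair segments: `pvSegs xs a (b::t)` slices xs from a+1 to b, then continues from b. -/
def pvSegs (xs : List Int) : Int → List Int → List (List Int)
  | _, [] => []
  | a, b :: t => PySem.List.slice xs (some (a + 1)) (some b) :: pvSegs xs b t

theorem zip_tail_eq_pvSegs (xs : List Int) (a : Int) (t : List Int) :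
    (((a :: t).zip t).map
      (fun p => PySem.List.slice xs (some (p.1 + 1)) (some p.2))) = pvSegs xs a t := by
  induction t generalizing a with
  | nil => simp [pvSegs]
  | cons b t' ih => simp [pvSegs, ih]

/-- Shorthand for B's marker-position list, starting at index s. -/
def pvNegs (r : List Int) (s : Int) : List Int :=
  (PySem.List.enumerate r s).filterMap (fun p => if p.2 < 0 then some p.1 else none)

theorem pvNegs_cons (x : Int) (r : List Int) (s : Int) :
    pvNegs (x :: r) s = if x < 0 then s :: pvNegs r (s + 1) else pvNegs r (s + 1) := by
  simp only [pvNegs, PySem.List.enumerate_cons, List.filterMap_cons]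
  split_ifs <;> simp

theorem pvNegs_mem (r : List Int) (s : Int) (b : Int) (hb : b ∈ pvNegs r s) :
    ∃ k : Nat, b = s + k := by
  simp only [pvNegs] at hb
  obtain ⟨p, hp, hf⟩ := List.mem_filterMap.mp hb
  obtain ⟨k, hk, rfl⟩ := (PySem.List.mem_enumerate_iff _ _ _).mp hp
  split_ifs at hf
  exact ⟨k, by simpa using hf.symm⟩

/-- Main B-side lemma: slicing from position j of xs reproduces pvSplit of the suffix. -/
theorem pvSegsMain (r : List Int) : ∀ (xs : List Int) (j : Nat), xs.drop j = r →
    pvSegs xs ((j : Int) - 1) (pvNegs r (j : Int) ++ [(xs.length : Int)]) = pvSplit r := by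
  induction r with
  | nil =>
    intro xs j hdrop
    have hj : xs.length ≤ j := by
      by_contra h
      have := List.length_drop (l := xs) (i := j)
      rw [hdrop] at this; simp at this; omega
    simp only [pvNegs, PySem.List.enumerate_nil, List.filterMap_nil, List.nil_append,
      pvSegs, pvSplit]
    have : (j : Int) - 1 + 1 = ((j : Nat) : Int) := by ring
    rw [this, PySem.List.slice_natCast, hdrop]
    simp
  | cons x rest ih =>
    intro xs j hdrop
    have hjlen : j < xs.length := by
      by_contra h
      have := List.length_drop (l := xs) (i := j)
      rw [hdrop] at this; simp at this; omega
    have hdrop' : xs.drop (j + 1) = rest := by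
      rw [← List.drop_drop, hdrop, List.drop_one, List.tail_cons]
    have hx' : xs.drop j = x :: rest := hdrop
    by_cases hx : x < 0
    · rw [pvNegs_cons, if_pos hx]
      simp only [List.cons_append, pvSegs]
      have h1 : (j : Int) - 1 + 1 = ((j : Nat) : Int) := by ring
      rw [h1, PySem.List.slice_natCast]
      have h2 : ((j : Nat) : Int) = ((j + 1 : Nat) : Int) - 1 := by push_cast; ring
      have h3 : ((j : Int) + 1) = ((j + 1 : Nat) : Int) := by push_cast; ring
      rw [h3, h2, ih xs (j + 1) hdrop']
      simp [pvSplit, hx]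
    · rw [pvNegs_cons, if_neg hx]
      have hIH := ih xs (j + 1) hdrop'
      have hc : ((j + 1 : Nat) : Int) = (j : Int) + 1 := by push_cast; ring
      rw [hc] at hIH
      -- head boundary b of the remaining list is ≥ j+1
      have key : ∀ (b : Int), ((j : Int) + 1 ≤ b) → ∃ bn : Nat, b = (bn : Int) ∧ j + 1 ≤ bn := by
        intro b hb
        refine ⟨b.toNat, ?_, ?_⟩ <;> omega
      -- split on the head of pvNegs rest (j+1) ++ [len]
      have hfirst : ∀ (b : Int) (t : List Int), ((j : Int) + 1 ≤ b) →
          pvSegs xs ((j : Int) - 1) (b :: t)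
            = (pvSegs xs ((j : Int) + 1 - 1) (b :: t)).modifyHead (fun s => x :: s) := by
        intro b t hb
        obtain ⟨bn, rfl, hbn⟩ := key b hb
        simp only [pvSegs, List.modifyHead]
        congr 1
        have h1 : (j : Int) - 1 + 1 = ((j : Nat) : Int) := by ring
        have h2 : (j : Int) + 1 - 1 + 1 = ((j + 1 : Nat) : Int) := by push_cast; ring
        rw [h1, h2, PySem.List.slice_natCast, PySem.List.slice_natCast, hx', hdrop']
        have : bn - j = (bn - (j + 1)) + 1 := by omega
        rw [this, List.take_succ_cons]
      cases hcase : pvNegs rest ((j : Int) + 1) with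
      | nil =>
        rw [hcase] at hIH
        simp only [List.nil_append] at hIH ⊢
        rw [hfirst _ _ (by omega), hIH]
        simp [pvSplit, hx]
      | cons b t =>
        have hbmem : b ∈ pvNegs rest ((j : Int) + 1) := by rw [hcase]; simp
        obtain ⟨k, hk⟩ := pvNegs_mem _ _ _ hbmem
        have hble : (j : Int) + 1 ≤ b := by rw [hk]; omega
        rw [hcase] at hIH
        simp only [List.cons_append] at hIH ⊢
        rw [hfirst _ _ hble, hIH]
        simp [pvSplit, hx]

theorem portB_eq_pvSplit (xs : List Int) : tour_vector_to_list_alt xs = pvSplit xs := by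
  have h := pvSegsMain xs xs 0 (by simp)
  simp only [Nat.cast_zero] at h
  calc tour_vector_to_list_alt xs
      = pvSegs xs (-1) (pvNegs xs 0 ++ [(xs.length : Int)]) := by
        simp only [tour_vector_to_list_alt, pvNegs]
        rw [List.cons_append]
        exact zip_tail_eq_pvSegs xs (-1) _
    _ = pvSplit xs := by
        have : (0 : Int) - 1 = -1 := by ring
        rw [← this]; exact h

-- ===== VERDICT (by name: the statement is the Claim_ definition above) =====
theorem tour_vector_to_list_spec : Claim_equal_tour_vector_to_list := by
  intro tv _
  unfold Spec_tour_vector_to_list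
  rw [portA_eq_pvSplit, portB_eq_pvSplit]
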